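-- pv_equiv track=rewrite | github.com/ajay-1110/Python-Coderbyte-Challenges | Array Challenges/changing_sequence.py | signchange
-- ===== SOURCE A (Python) =====
-- def signchange(arr):
--     l = []
--     for i in range(1,len(arr)):
--         if arr[i] - arr[i-1] > 0:
--             l.append('+')
--         else:
--             l.append('-')
--     count = 0
--     indx = []
--     for i in range(1,len(l)):
--         if l[i]!= l[i-1]:
--             count += 1
--             indx.append(i)
--         else:
--             count += 0
--     if count == 0:
--         minindx = -1
--     else:
--         minindx = min(indx)
--     return count,minindx
-- ===== SOURCE B (Python) =====
-- def signchange(arr):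
--     count = 0
--     minindx = -1
--     prev = None
--     for i, (x, y) in enumerate(zip(arr, arr[1:]), 1):
--         cur = y - x > 0
--         if prev is not None and cur != prev:
--             count += 1
--             if minindx == -1:
--                 minindx = i - 1
--         prev = cur
--     return count, minindx
-- ===== Notes on version B (the rewrite author's own statement) =====
-- stated objective: simpler
-- what changed: Single pass over adjacent pairs tracking only the previous difference's sign and the first change index, instead of materialising the full '+'/'-' sign list, a second indexed loop building an index list, and a min() call.
import Mathlib
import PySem

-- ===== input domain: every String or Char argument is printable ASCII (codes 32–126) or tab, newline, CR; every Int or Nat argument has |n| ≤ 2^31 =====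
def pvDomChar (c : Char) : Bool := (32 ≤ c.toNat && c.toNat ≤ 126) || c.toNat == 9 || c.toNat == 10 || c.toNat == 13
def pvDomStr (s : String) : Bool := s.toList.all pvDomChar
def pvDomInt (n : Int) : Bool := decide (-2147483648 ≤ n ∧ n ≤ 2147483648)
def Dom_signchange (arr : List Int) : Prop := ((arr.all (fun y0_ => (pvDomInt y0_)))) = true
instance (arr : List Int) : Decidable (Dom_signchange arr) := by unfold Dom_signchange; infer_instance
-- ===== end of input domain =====

-- B replaces A's materialised '+'/'-' sign list, second indexed loop, index list and min()
-- by a single pass over adjacent pairs tracking the previous sign and the first change index.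

-- ===== PORT A =====
def signchange (arr : List Int) : Int × Int :=
  let l : List Char := (PySem.List.pyRange 1 (arr.length : Int) 1).foldl
    (fun acc i =>
      if PySem.List.pyGetD arr i 0 - PySem.List.pyGetD arr (i - 1) 0 > 0 then acc ++ ['+']
      else acc ++ ['-']) []
  let s : Int × List Int := (PySem.List.pyRange 1 (l.length : Int) 1).foldl
    (fun s i =>
      if PySem.List.pyGetD l i ' ' ≠ PySem.List.pyGetD l (i - 1) ' ' then (s.1 + 1, s.2 ++ [i])
      else (s.1 + 0, s.2)) (0, [])
  let minindx : Int := if s.1 = 0 then -1 else (PySem.List.min? s.2 (fun y => y)).getD 0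
  (s.1, minindx)

-- ===== PORT B =====
def signchange_alt (arr : List Int) : Int × Int :=
  let s : Int × Int × Option Bool :=
    (PySem.List.enumerate (arr.zip (PySem.List.slice arr (some 1) none)) 1).foldl
      (fun (st : Int × Int × Option Bool) (e : Int × Int × Int) =>
        let cur : Bool := decide (e.2.2 - e.2.1 > 0)
        match st.2.2 with
        | some p =>
          if cur ≠ p then
            (st.1 + 1, (if st.2.1 = -1 then e.1 - 1 else st.2.1), some cur)
          else (st.1, st.2.1, some cur)
        | none => (st.1, st.2.1, some cur))
      (0, -1, none)
  (s.1, s.2.1)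

-- ===== PRECONDITION & SPEC =====
def Spec_signchange (arr : List Int) (out : Int × Int) : Prop := out = signchange_alt arr
instance (arr : List Int) (out : Int × Int) : Decidable (Spec_signchange arr out) := by unfold Spec_signchange; infer_instance

-- ===== CLAIM (what is proved, stated in full; the proofs are below) =====
def Claim_equal_signchange : Prop := ∀ (arr : List Int), Dom_signchange arr → Spec_signchange arr (signchange arr)

-- ===== LEMMAS AND PROOFS =====
-- map over pyRange reading adjacent elements = map over zip with tail
theorem pv_map_adj {α β : Type} (xs : List α) (d : α) (g : α → α → β) :
    (PySem.List.pyRange 1 (xs.length : Int) 1).map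
      (fun i => g (PySem.List.pyGetD xs (i - 1) d) (PySem.List.pyGetD xs i d))
    = (xs.zip xs.tail).map (fun p => g p.1 p.2) := by
  apply List.ext_getElem
  · simp [PySem.List.length_pyRange_one]
  · intro k h1 h2
    have hk : k < (PySem.List.pyRange 1 (xs.length : Int) 1).length := by
      simpa using h1
    have hklen : k + 1 < xs.length := by
      simp [PySem.List.length_pyRange_one] at hk; omega
    simp only [List.getElem_map, PySem.List.getElem_pyRange_one]
    have e1 : (1 : Int) + (k : Int) - 1 = ((k : Nat) : Int) := by omega
    have e2 : (1 : Int) + (k : Int) = (((k + 1 : Nat)) : Int) := by push_cast; omega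
    rw [e1, e2, PySem.List.pyGetD_natCast, PySem.List.pyGetD_natCast]
    have hz : k < (xs.zip xs.tail).length := by simpa using h2
    rw [List.getElem_zip]
    have ht : k < xs.tail.length := by simp at hz ⊢; omega
    rw [List.getElem_tail]
    rw [List.getD_eq_getElem _ _ (by omega), List.getD_eq_getElem _ _ (by omega)]

-- the index range of A's second loop, as fst of an enumerate over adjacent pairs
theorem pv_rng_eq {α : Type} (xs : List α) :
    PySem.List.pyRange 1 (xs.length : Int) 1
    = (PySem.List.enumerate (xs.zip xs.tail) 1).map (·.1) := by
  rw [PySem.List.map_fst_enumerate]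
  rw [PySem.List.pyRange_one, PySem.List.pyRange_one]
  have : ((xs.length : Int) - 1).toNat = ((1 + ((xs.zip xs.tail).length : Int)) - 1).toNat := by
    simp [List.length_zip]
  rw [this]

-- counting fold of A's second loop, in closed form
theorem pv_foldl_count_append {γ : Type} (L : List γ) (f : γ → Int) (c : Int) (xs : List Int) :
    L.foldl (fun s e => (s.1 + 1, s.2 ++ [f e])) (c, xs)
    = (c + (L.length : Int), xs ++ L.map f) := by
  induction L generalizing c xs with
  | nil => simp
  | cons x t ih => simp [ih]; omega

theorem pv_enumerate_map {α β : Type} (f : α → β) (xs : List α) (s : Int) :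
    PySem.List.enumerate (xs.map f) s
    = (PySem.List.enumerate xs s).map (fun e => (e.1, f e.2)) := by
  induction xs generalizing s with
  | nil => simp [PySem.List.enumerate]
  | cons x t ih => simp [PySem.List.enumerate_cons, ih]

def pvCnt (p : Bool) : List Bool → Int
  | [] => 0
  | x :: t => (if x ≠ p then 1 else 0) + pvCnt x t

def pvFst (p : Bool) (i : Int) : List Bool → Option Int
  | [] => none
  | x :: t => if x ≠ p then some i else pvFst x (i + 1) t

def pvLast (p : Bool) : List Bool → Bool
  | [] => p
  | x :: t => pvLast x t

def pvStep (st : Int × Int × Option Bool) (e : Int × Bool) : Int × Int × Option Bool :=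
  match st.2.2 with
  | some p =>
    if e.2 ≠ p then (st.1 + 1, (if st.2.1 = -1 then e.1 - 1 else st.2.1), some e.2)
    else (st.1, st.2.1, some e.2)
  | none => (st.1, st.2.1, some e.2)

theorem pv_aux1 (t : List Bool) (p : Bool) (i c m : Int) (hm : m ≠ -1) :
    (PySem.List.enumerate t i).foldl pvStep (c, m, some p)
    = (c + pvCnt p t, m, some (pvLast p t)) := by
  induction t generalizing p i c with
  | nil => simp [PySem.List.enumerate, pvCnt, pvLast]
  | cons x t ih =>
    rw [PySem.List.enumerate_cons]
    simp only [List.foldl_cons]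
    by_cases hx : x = p
    · simp [pvStep, hx, ih, pvCnt, pvLast]
    · simp only [pvStep, hx, ne_eq, not_false_iff, if_true, if_neg hm]
      rw [ih]
      simp [pvCnt, pvLast, hx]; ring

theorem pv_aux2 (t : List Bool) (p : Bool) (i c : Int) (hi : 1 ≤ i) :
    (PySem.List.enumerate t i).foldl pvStep (c, -1, some p)
    = (c + pvCnt p t, (pvFst p (i - 1) t).getD (-1), some (pvLast p t)) := by
  induction t generalizing p i c with
  | nil => simp [PySem.List.enumerate, pvCnt, pvFst, pvLast]
  | cons x t ih =>
    rw [PySem.List.enumerate_cons]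
    simp only [List.foldl_cons]
    by_cases hx : x = p
    · have hs : pvStep (c, -1, some p) (i, x) = (c, -1, some x) := by
        simp [pvStep, hx]
      rw [hs, ih x (i + 1) c (by omega)]
      have e : i + 1 - 1 = (i - 1) + 1 := by ring
      rw [e]
      simp [pvCnt, pvFst, pvLast, hx]
    · have h1 : pvStep (c, -1, some p) (i, x) = (c + 1, i - 1, some x) := by
        simp [pvStep, hx]
      rw [h1, pv_aux1 t x (i + 1) (c + 1) (i - 1) (by omega)]
      simp [pvCnt, pvFst, pvLast, hx]; ring

def pvQ (e : Int × Bool × Bool) : Bool := decide (e.2.2 ≠ e.2.1)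

theorem pv_cnt_nonneg (t : List Bool) (p : Bool) : 0 ≤ pvCnt p t := by
  induction t generalizing p with
  | nil => simp [pvCnt]
  | cons x t ih => simp only [pvCnt]; have := ih x; split_ifs <;> omega

theorem pv_core_cnt (t : List Bool) (p : Bool) (i : Int) :
    ((((PySem.List.enumerate ((p :: t).zip t) i).filter pvQ).length : Nat) : Int)
    = pvCnt p t := by
  induction t generalizing p i with
  | nil => simp [pvCnt]
  | cons x t ih =>
    rw [show (p :: x :: t).zip (x :: t) = (p, x) :: ((x :: t).zip t) by simp [List.zip]]
    rw [PySem.List.enumerate_cons, List.filter_cons]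
    by_cases hx : x = p
    · rw [show pvQ (i, p, x) = false by simp [pvQ, hx]]
      simp only [Bool.false_eq_true, if_false]
      rw [ih x (i + 1)]
      simp [pvCnt, hx]
    · rw [show pvQ (i, p, x) = true by simp [pvQ, hx]]
      simp only [if_true]
      rw [List.length_cons]
      push_cast
      rw [ih x (i + 1)]
      simp [pvCnt, hx]; ring

theorem pv_core_fst (t : List Bool) (p : Bool) (i : Int) :
    (((PySem.List.enumerate ((p :: t).zip t) i).filter pvQ).head?).map (·.1)
    = pvFst p i t := by
  induction t generalizing p i with
  | nil => simp [pvFst]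
  | cons x t ih =>
    rw [show (p :: x :: t).zip (x :: t) = (p, x) :: ((x :: t).zip t) by simp [List.zip]]
    rw [PySem.List.enumerate_cons, List.filter_cons]
    by_cases hx : x = p
    · rw [show pvQ (i, p, x) = false by simp [pvQ, hx]]
      simp only [Bool.false_eq_true, if_false]
      rw [ih x (i + 1)]
      simp [pvFst, hx]
    · rw [show pvQ (i, p, x) = true by simp [pvQ, hx]]
      simp only [if_true, List.head?_cons]
      simp [pvFst, hx]

theorem pv_fst_none (t : List Bool) (p : Bool) (i : Int) :
    pvFst p i t = none ↔ pvCnt p t = 0 := by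
  induction t generalizing p i with
  | nil => simp [pvFst, pvCnt]
  | cons x t ih =>
    by_cases hx : x = p
    · simp [pvFst, pvCnt, hx, ih]
    · simp [pvFst, pvCnt, hx]
      have := pv_cnt_nonneg t x
      omega

theorem pv_foldl_min (rest : List Int) (x : Int) (h : ∀ y ∈ rest, x ≤ y) :
    rest.foldl min x = x := by
  induction rest generalizing x with
  | nil => rfl
  | cons a t ih =>
    simp only [List.foldl_cons]
    rw [min_eq_left (h a (by simp))]
    exact ih x (fun y hy => h y (by simp [hy]))

def pvSgn (p : Int × Int) : Bool := decide (p.2 - p.1 > 0)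

def pvRef (b : List Bool) (mdef : Int) : Int × Int :=
  match b with
  | [] => (0, -1)
  | p :: t => (pvCnt p t, if pvCnt p t = 0 then -1 else (pvFst p 1 t).getD mdef)

theorem pv_B_eq (arr : List Int) :
    signchange_alt arr = pvRef ((arr.zip arr.tail).map pvSgn) (-1) := by
  unfold signchange_alt
  rw [PySem.List.slice_from_one]
  have hbody : (fun (st : Int × Int × Option Bool) (e : Int × Int × Int) =>
        let cur : Bool := decide (e.2.2 - e.2.1 > 0)
        match st.2.2 with
        | some p =>
          if cur ≠ p then
            (st.1 + 1, (if st.2.1 = -1 then e.1 - 1 else st.2.1), some cur)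
          else (st.1, st.2.1, some cur)
        | none => (st.1, st.2.1, some cur))
      = (fun st e => pvStep st (e.1, pvSgn e.2)) := by
    funext st e
    simp only [pvStep, pvSgn]
  rw [hbody]
  rw [show (fun (st : Int × Int × Option Bool) (e : Int × Int × Int) => pvStep st (e.1, pvSgn e.2))
        = (fun st (e : Int × Int × Int) => pvStep st ((fun (e : Int × Int × Int) => (e.1, pvSgn e.2)) e)) from rfl]
  rw [← List.foldl_map]
  rw [show (PySem.List.enumerate (arr.zip arr.tail) 1).map (fun e => (e.1, pvSgn e.2))
        = PySem.List.enumerate ((arr.zip arr.tail).map pvSgn) 1 from (pv_enumerate_map _ _ _).symm]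
  cases hb : (arr.zip arr.tail).map pvSgn with
  | nil => simp [PySem.List.enumerate, pvRef]
  | cons p t =>
    rw [PySem.List.enumerate_cons]
    simp only [List.foldl_cons]
    have h1 : pvStep (0, -1, none) (1, p) = (0, -1, some p) := by simp [pvStep]
    rw [h1, show (1:Int) + 1 = 2 by norm_num, pv_aux2 t p 2 0 (by omega)]
    by_cases hc : pvCnt p t = 0
    · have hf := (pv_fst_none t p 1).mpr hc
      simp [pvRef, hc, hf]
    · simp [pvRef, hc]

def pvH (t : Bool) : Char := if t then '+' else '-'

theorem pv_l_eq (arr : List Int) :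
    (PySem.List.pyRange 1 (arr.length : Int) 1).foldl
      (fun acc i =>
        if PySem.List.pyGetD arr i 0 - PySem.List.pyGetD arr (i - 1) 0 > 0 then acc ++ ['+']
        else acc ++ ['-']) []
    = ((arr.zip arr.tail).map pvSgn).map pvH := by
  rw [PySem.List.foldl_congr_mem _ _
      (fun acc i => acc ++ [if PySem.List.pyGetD arr i 0 - PySem.List.pyGetD arr (i - 1) 0 > 0 then '+' else '-'])
      _ (by intro acc x _; split_ifs <;> simp <;> omega)]
  rw [PySem.List.foldl_append_singleton_eq_map]
  rw [pv_map_adj arr 0 (fun a b => if b - a > 0 then '+' else '-')]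
  rw [List.map_map, List.nil_append]
  congr 1
  funext p
  simp only [Function.comp, pvSgn, pvH]
  simp

theorem pv_pvH_ne_iff (x y : Bool) : (pvH x ≠ pvH y) ↔ x ≠ y := by
  cases x <;> cases y <;> simp [pvH]

theorem pv_A_eq (arr : List Int) :
    signchange arr = pvRef ((arr.zip arr.tail).map pvSgn) 0 := by
  unfold signchange
  simp only [pv_l_eq]
  set b : List Bool := (arr.zip arr.tail).map pvSgn with hb
  set lc : List Char := b.map pvH with hlc
  have hzip : lc.zip lc.tail = (b.zip b.tail).map (Prod.map pvH pvH) := by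
    rw [hlc, ← List.map_tail, List.zip_map]
  have hrng : PySem.List.pyRange 1 (lc.length : Int) 1
      = (PySem.List.enumerate (b.zip b.tail) 1).map (fun e => e.1) := by
    rw [pv_rng_eq lc, hzip, pv_enumerate_map, List.map_map]
    rfl
  have hfold : (PySem.List.pyRange 1 (lc.length : Int) 1).foldl
      (fun s i =>
        if PySem.List.pyGetD lc i ' ' ≠ PySem.List.pyGetD lc (i - 1) ' ' then (s.1 + 1, s.2 ++ [i])
        else (s.1 + 0, s.2)) ((0 : Int), ([] : List Int))
      = (((((PySem.List.enumerate (b.zip b.tail) 1).filter pvQ).length : Nat) : Int),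
         ((PySem.List.enumerate (b.zip b.tail) 1).filter pvQ).map (fun e => e.1)) := by
    rw [hrng, List.foldl_map]
    rw [PySem.List.foldl_congr_mem _ _
        (fun (s : Int × List Int) e => if pvQ e then (s.1 + 1, s.2 ++ [e.1]) else s) _ ?hcg]
    · rw [PySem.List.foldl_if_eq_foldl_filter]
      rw [pv_foldl_count_append _ (fun (e : Int × Bool × Bool) => e.1) 0 []]
      simp
    case hcg =>
      intro s e he
      obtain ⟨k, hk, rfl⟩ := (PySem.List.mem_enumerate_iff _ _ _).mp he
      have hkz : k < (b.zip b.tail).length := hk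
      have hbk : k + 1 < b.length := by
        simp [List.length_zip] at hkz; omega
      have hlen : lc.length = b.length := by simp [hlc]
      have e1 : (1 : Int) + (k : Int) - 1 = ((k : Nat) : Int) := by omega
      have e2 : (1 : Int) + (k : Int) = (((k + 1 : Nat)) : Int) := by push_cast; omega
      have g1 : PySem.List.pyGetD lc ((1 : Int) + (k : Int) - 1) ' ' = pvH b[k] := by
        rw [e1, PySem.List.pyGetD_natCast, List.getD_eq_getElem _ _ (by omega)]
        simp [hlc]
      have g2 : PySem.List.pyGetD lc ((1 : Int) + (k : Int)) ' ' = pvH b[k + 1] := by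
        rw [e2, PySem.List.pyGetD_natCast, List.getD_eq_getElem _ _ (by omega)]
        simp [hlc]
      have hget : (b.zip b.tail)[k] = (b[k], b[k + 1]) := by
        rw [List.getElem_zip, List.getElem_tail]
      simp only [hget, g1, g2]
      by_cases hc : b[k + 1] = b[k]
      · rw [if_neg (by simp [hc]), if_neg (by simp [pvQ, hc])]
        simp
      · rw [if_pos (by simp [pv_pvH_ne_iff, hc]), if_pos (by simp [pvQ, hc])]
  rw [hfold]
  cases hbc : b with
  | nil => simp [pvRef]
  | cons p t =>
    have hcnt := pv_core_cnt t p 1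
    have hfst := pv_core_fst t p 1
    by_cases hc : pvCnt p t = 0
    · simp only [pvRef, List.tail_cons]
      simp [hcnt, hc]
    · have hne : ((((PySem.List.enumerate ((p :: t).zip t) 1).filter pvQ).length : Nat) : Int) ≠ 0 := by
        rw [hcnt]; exact hc
      obtain ⟨j, hj⟩ : ∃ j, pvFst p 1 t = some j := by
        cases hf : pvFst p 1 t with
        | none => exact absurd ((pv_fst_none t p 1).mp hf) hc
        | some j => exact ⟨j, rfl⟩
      simp only [pvRef, List.tail_cons, if_neg hc, hj, Option.getD_some]
      cases hF : (PySem.List.enumerate ((p :: t).zip t) 1).filter pvQ with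
      | nil => rw [hF] at hne; simp at hne
      | cons eh rest =>
        rw [hF] at hcnt hfst
        simp only [List.head?_cons, Option.map_some] at hfst
        have hj1 : eh.1 = j := by rw [hj] at hfst; exact Option.some.inj hfst
        have hpw : List.Pairwise (· < ·) ((eh :: rest).map (fun e => e.1)) := by
          rw [← hF]
          exact List.pairwise_map.mpr
            ((PySem.List.pairwise_lt_enumerate _ _).filter pvQ)
        rw [List.map_cons, PySem.List.min?_id_cons]
        rw [pv_foldl_min _ _ (by
          intro y hy
          have h2 : eh.1 < y := (List.pairwise_cons.mp hpw).1 y hy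
          omega)]
        simp [hj1]
        simp only [List.length_cons] at hcnt
        push_cast at hcnt
        omega

theorem pv_main (arr : List Int) : signchange arr = signchange_alt arr := by
  rw [pv_A_eq, pv_B_eq]
  cases hb : (arr.zip arr.tail).map pvSgn with
  | nil => rfl
  | cons p t =>
    simp only [pvRef]
    by_cases hc : pvCnt p t = 0
    · simp [hc]
    · obtain ⟨j, hj⟩ : ∃ j, pvFst p 1 t = some j := by
        cases hf : pvFst p 1 t with
        | none => exact absurd ((pv_fst_none t p 1).mp hf) hc
        | some j => exact ⟨j, rfl⟩
      simp [hc, hj]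

-- ===== VERDICT (by name: the statement is the Claim_ definition above) =====
theorem signchange_spec : Claim_equal_signchange := by
  intro arr _
  exact pv_main arr
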